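-- pv_equiv track=rewrite | github.com/patareshivraj/AI-KYC-OCR | kyc_validator.py | _group_field_errors
-- ===== SOURCE A (Python) =====
-- from typing import Any, Dict, List, Optional, Tuple
--
-- def _group_field_errors(errors: Dict[str, str]) -> Dict[str, Any]:
--     """Group flat field errors into per-document structure for the error response."""
--     grouped: Dict[str, Dict[str, str]] = {"pan": {}, "aadhaar": {}, "statement": {}}
--     for key, msg in errors.items():
--         if key.startswith("pan_"):
--             grouped["pan"][key] = msg
--         elif key.startswith("aadhaar_"):
--             grouped["aadhaar"][key] = msg
--         elif key.startswith("statement_"):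
--             grouped["statement"][key] = msg
--         else:
--             grouped.setdefault("other", {})[key] = msg
--
--     # Remove empty groups
--     return {k: v for k, v in grouped.items() if v}
-- ===== SOURCE B (Python) =====
-- from typing import Any, Dict
--
--
-- def _group_field_errors(errors: Dict[str, str]) -> Dict[str, Any]:
--     """Group flat field errors into per-document structure for the error response."""
--     pan = {k: v for k, v in errors.items() if k.startswith("pan_")}
--     aadhaar = {k: v for k, v in errors.items() if k.startswith("aadhaar_")}
--     statement = {k: v for k, v in errors.items() if k.startswith("statement_")}
--     other = {k: v for k, v in errors.items()
--              if not (k.startswith("pan_") or k.startswith("aadhaar_") or k.startswith("statement_"))}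
--     return {name: group
--             for name, group in (("pan", pan), ("aadhaar", aadhaar), ("statement", statement), ("other", other))
--             if group}
-- ===== Notes on version B (the rewrite author's own statement) =====
-- stated objective: alternative
-- what changed: Replaces the single dispatching loop over a mutable nested dict with four independent filtered dict comprehensions (one per document prefix, plus the complement for 'other') assembled in the fixed order pan, aadhaar, statement, other, dropping empty groups.
import Mathlib
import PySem

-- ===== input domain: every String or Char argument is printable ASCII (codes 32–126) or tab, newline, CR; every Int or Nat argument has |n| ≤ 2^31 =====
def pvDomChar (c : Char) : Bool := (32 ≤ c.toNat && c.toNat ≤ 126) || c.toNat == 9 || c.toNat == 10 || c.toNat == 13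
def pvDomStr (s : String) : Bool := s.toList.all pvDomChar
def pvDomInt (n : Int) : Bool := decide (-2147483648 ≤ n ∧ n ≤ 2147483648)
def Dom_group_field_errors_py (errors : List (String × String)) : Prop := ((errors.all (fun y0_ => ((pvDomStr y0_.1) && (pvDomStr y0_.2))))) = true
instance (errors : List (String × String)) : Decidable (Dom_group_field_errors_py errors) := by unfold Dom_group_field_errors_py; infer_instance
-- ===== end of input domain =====

-- B replaces A's single dispatching loop over a mutable nested dict with four independent
-- filtered dict comprehensions (one per prefix, plus the complement) assembled in fixed order
-- pan, aadhaar, statement, other, dropping empty groups (objective: alternative decomposition).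

-- ===== PORT A =====
-- the loop body of A's 'for key, msg in errors.items()' (grouped["pan"][key] = msg is
-- an in-place update of the value at an always-present key, ported as Dict.modify)
def pvStepA (g : PySem.Dict String (PySem.Dict String String)) (kv : String × String) :
    PySem.Dict String (PySem.Dict String String) :=
  if PySem.Str.startswith kv.1 "pan_" then
    g.modify "pan" PySem.Dict.empty (fun d => d.insert kv.1 kv.2)
  else if PySem.Str.startswith kv.1 "aadhaar_" then
    g.modify "aadhaar" PySem.Dict.empty (fun d => d.insert kv.1 kv.2)
  else if PySem.Str.startswith kv.1 "statement_" then
    g.modify "statement" PySem.Dict.empty (fun d => d.insert kv.1 kv.2)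
  else
    (g.setdefault "other" PySem.Dict.empty).modify "other" PySem.Dict.empty
      (fun d => d.insert kv.1 kv.2)

def group_field_errors_py (errors : List (String × String)) :
    List (String × List (String × String)) :=
  let grouped0 : PySem.Dict String (PySem.Dict String String) :=
    PySem.Dict.ofList [("pan", PySem.Dict.empty), ("aadhaar", PySem.Dict.empty),
                       ("statement", PySem.Dict.empty)]
  let grouped := errors.foldl pvStepA grouped0
  -- {k: v for k, v in grouped.items() if v}
  (grouped.items.filter (fun p => !p.2.items.isEmpty)).map (fun p => (p.1, p.2.items))

-- ===== PORT B =====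
-- {k: v for k, v in errors.items() if pred(k)}
def pvComp (errors : List (String × String)) (pred : String → Bool) :
    PySem.Dict String String :=
  errors.foldl (fun d kv => if pred kv.1 then d.insert kv.1 kv.2 else d) PySem.Dict.empty

def group_field_errors_py_alt (errors : List (String × String)) :
    List (String × List (String × String)) :=
  let pan := pvComp errors (fun k => PySem.Str.startswith k "pan_")
  let aadhaar := pvComp errors (fun k => PySem.Str.startswith k "aadhaar_")
  let statement := pvComp errors (fun k => PySem.Str.startswith k "statement_")
  let other := pvComp errors (fun k =>
    !(PySem.Str.startswith k "pan_" || PySem.Str.startswith k "aadhaar_"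
      || PySem.Str.startswith k "statement_"))
  -- {name: group for name, group in (...) if group}
  ([("pan", pan), ("aadhaar", aadhaar), ("statement", statement), ("other", other)].filter
      (fun p => !p.2.items.isEmpty)).map (fun p => (p.1, p.2.items))

-- ===== PRECONDITION & SPEC =====
def Spec_group_field_errors_py (errors : List (String × String)) (out : List (String × List (String × String))) : Prop := out = group_field_errors_py_alt errors
instance (errors : List (String × String)) (out : List (String × List (String × String))) : Decidable (Spec_group_field_errors_py errors out) := by unfold Spec_group_field_errors_py; infer_instance

-- ===== CLAIM (what is proved, stated in full; the proofs are below) =====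
def Claim_equal_group_field_errors_py : Prop := ∀ (errors : List (String × String)), Dom_group_field_errors_py errors → Spec_group_field_errors_py errors (group_field_errors_py errors)

-- ===== LEMMAS AND PROOFS =====

-- folding plain inserts of a list of pairs into a dict
def pvIns (l : List (String × String)) (d : PySem.Dict String String) :
    PySem.Dict String String :=
  l.foldl (fun d kv => d.insert kv.1 kv.2) d

-- the three prefixes are mutually exclusive
lemma pv_excl_pa (k : String) (h : PySem.Str.startswith k "pan_" = true) :
    PySem.Str.startswith k "aadhaar_" = false := by
  simp only [PySem.Str.startswith_eq] at h ⊢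
  rw [PySem.Chars.startswith_iff] at h
  by_contra hc
  simp only [Bool.not_eq_false] at hc
  rw [PySem.Chars.startswith_iff] at hc
  obtain ⟨t1, h1⟩ := h
  obtain ⟨t2, h2⟩ := hc
  rw [← h1] at h2
  simp at h2

lemma pv_excl_ps (k : String) (h : PySem.Str.startswith k "pan_" = true) :
    PySem.Str.startswith k "statement_" = false := by
  simp only [PySem.Str.startswith_eq] at h ⊢
  rw [PySem.Chars.startswith_iff] at h
  by_contra hc
  simp only [Bool.not_eq_false] at hc
  rw [PySem.Chars.startswith_iff] at hc
  obtain ⟨t1, h1⟩ := h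
  obtain ⟨t2, h2⟩ := hc
  rw [← h1] at h2
  simp at h2

lemma pv_excl_as (k : String) (h : PySem.Str.startswith k "aadhaar_" = true) :
    PySem.Str.startswith k "statement_" = false := by
  simp only [PySem.Str.startswith_eq] at h ⊢
  rw [PySem.Chars.startswith_iff] at h
  by_contra hc
  simp only [Bool.not_eq_false] at hc
  rw [PySem.Chars.startswith_iff] at hc
  obtain ⟨t1, h1⟩ := h
  obtain ⟨t2, h2⟩ := hc
  rw [← h1] at h2
  simp at h2

-- once "other" is present, the loop keeps the four-key shape
lemma pv_main4 (l : List (String × String)) (p a s o : PySem.Dict String String) :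
    l.foldl pvStepA ⟨[("pan", p), ("aadhaar", a), ("statement", s), ("other", o)]⟩ =
      ⟨[("pan", pvIns (l.filter (fun kv => PySem.Str.startswith kv.1 "pan_")) p),
        ("aadhaar", pvIns (l.filter (fun kv => PySem.Str.startswith kv.1 "aadhaar_")) a),
        ("statement", pvIns (l.filter (fun kv => PySem.Str.startswith kv.1 "statement_")) s),
        ("other", pvIns (l.filter (fun kv =>
          !(PySem.Str.startswith kv.1 "pan_" || PySem.Str.startswith kv.1 "aadhaar_"
            || PySem.Str.startswith kv.1 "statement_"))) o)]⟩ := by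
  induction l generalizing p a s o with
  | nil => simp [pvIns]
  | cons kv t ih =>
    by_cases hp : PySem.Str.startswith kv.1 "pan_" = true
    · have ha := pv_excl_pa kv.1 hp
      have hs := pv_excl_ps kv.1 hp
      simp at hp ha hs
      simp [pvStepA, hp, ha, hs, PySem.Dict.modify, PySem.Dict.insert, PySem.Dict.contains,
        PySem.Dict.getD, PySem.Dict.get?, List.find?, ih, pvIns];
          rfl
    · by_cases ha : PySem.Str.startswith kv.1 "aadhaar_" = true
      · have hs := pv_excl_as kv.1 ha
        rw [Bool.not_eq_true] at hp
        simp at hp ha hs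
        simp [pvStepA, hp, ha, hs, PySem.Dict.modify, PySem.Dict.insert, PySem.Dict.contains,
          PySem.Dict.getD, PySem.Dict.get?, List.find?, ih, pvIns];
          rfl
      · by_cases hs : PySem.Str.startswith kv.1 "statement_" = true
        · rw [Bool.not_eq_true] at hp ha
          simp at hp ha hs
          simp [pvStepA, hp, ha, hs, PySem.Dict.modify, PySem.Dict.insert, PySem.Dict.contains,
            PySem.Dict.getD, PySem.Dict.get?, List.find?, ih, pvIns];
          rfl
        · rw [Bool.not_eq_true] at hp ha hs
          simp at hp ha hs
          simp [pvStepA, hp, ha, hs, PySem.Dict.setdefault, PySem.Dict.modify, PySem.Dict.insert,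
            PySem.Dict.contains, PySem.Dict.getD, PySem.Dict.get?, List.find?, ih, pvIns];
          rfl

-- characterisation of A's grouping loop from the initial three-key dict: no "other" key
lemma pv_main3_none (l : List (String × String)) (p a s : PySem.Dict String String)
    (h : l.filter (fun kv =>
        !(PySem.Str.startswith kv.1 "pan_" || PySem.Str.startswith kv.1 "aadhaar_"
          || PySem.Str.startswith kv.1 "statement_")) = []) :
    l.foldl pvStepA ⟨[("pan", p), ("aadhaar", a), ("statement", s)]⟩ =
      ⟨[("pan", pvIns (l.filter (fun kv => PySem.Str.startswith kv.1 "pan_")) p),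
        ("aadhaar", pvIns (l.filter (fun kv => PySem.Str.startswith kv.1 "aadhaar_")) a),
        ("statement", pvIns (l.filter (fun kv => PySem.Str.startswith kv.1 "statement_")) s)]⟩ := by
  induction l generalizing p a s with
  | nil => simp [pvIns]
  | cons kv t ih =>
    by_cases hp : PySem.Str.startswith kv.1 "pan_" = true
    · have ha := pv_excl_pa kv.1 hp
      have hs := pv_excl_ps kv.1 hp
      simp at hp ha hs
      have hfo : (kv :: t).filter (fun kv =>
          !(PySem.Str.startswith kv.1 "pan_" || PySem.Str.startswith kv.1 "aadhaar_"
            || PySem.Str.startswith kv.1 "statement_")) = t.filter (fun kv =>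
          !(PySem.Str.startswith kv.1 "pan_" || PySem.Str.startswith kv.1 "aadhaar_"
            || PySem.Str.startswith kv.1 "statement_")) := by simp [hp]
      rw [hfo] at h
      simp [pvStepA, hp, ha, hs, PySem.Dict.modify, PySem.Dict.insert, PySem.Dict.contains,
        PySem.Dict.getD, PySem.Dict.get?, List.find?, fun p a s => ih p a s h, pvIns];
          rfl
    · by_cases ha : PySem.Str.startswith kv.1 "aadhaar_" = true
      · have hs := pv_excl_as kv.1 ha
        rw [Bool.not_eq_true] at hp
        simp at hp ha hs
        have hfo : (kv :: t).filter (fun kv =>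
            !(PySem.Str.startswith kv.1 "pan_" || PySem.Str.startswith kv.1 "aadhaar_"
              || PySem.Str.startswith kv.1 "statement_")) = t.filter (fun kv =>
            !(PySem.Str.startswith kv.1 "pan_" || PySem.Str.startswith kv.1 "aadhaar_"
              || PySem.Str.startswith kv.1 "statement_")) := by simp [ha]
        rw [hfo] at h
        simp [pvStepA, hp, ha, hs, PySem.Dict.modify, PySem.Dict.insert, PySem.Dict.contains,
          PySem.Dict.getD, PySem.Dict.get?, List.find?, fun p a s => ih p a s h, pvIns];
          rfl
      · by_cases hs : PySem.Str.startswith kv.1 "statement_" = true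
        · rw [Bool.not_eq_true] at hp ha
          simp at hp ha hs
          have hfo : (kv :: t).filter (fun kv =>
              !(PySem.Str.startswith kv.1 "pan_" || PySem.Str.startswith kv.1 "aadhaar_"
                || PySem.Str.startswith kv.1 "statement_")) = t.filter (fun kv =>
              !(PySem.Str.startswith kv.1 "pan_" || PySem.Str.startswith kv.1 "aadhaar_"
                || PySem.Str.startswith kv.1 "statement_")) := by simp [hs]
          rw [hfo] at h
          simp [pvStepA, hp, ha, hs, PySem.Dict.modify, PySem.Dict.insert, PySem.Dict.contains,
            PySem.Dict.getD, PySem.Dict.get?, List.find?, fun p a s => ih p a s h, pvIns];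
          rfl
        · exfalso
          rw [Bool.not_eq_true] at hp ha hs
          simp at hp ha hs
          simp [hp, ha, hs] at h

-- characterisation of A's grouping loop when some key falls in "other"
lemma pv_main3_some (l : List (String × String)) (p a s : PySem.Dict String String)
    (h : l.filter (fun kv =>
        !(PySem.Str.startswith kv.1 "pan_" || PySem.Str.startswith kv.1 "aadhaar_"
          || PySem.Str.startswith kv.1 "statement_")) ≠ []) :
    l.foldl pvStepA ⟨[("pan", p), ("aadhaar", a), ("statement", s)]⟩ =
      ⟨[("pan", pvIns (l.filter (fun kv => PySem.Str.startswith kv.1 "pan_")) p),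
        ("aadhaar", pvIns (l.filter (fun kv => PySem.Str.startswith kv.1 "aadhaar_")) a),
        ("statement", pvIns (l.filter (fun kv => PySem.Str.startswith kv.1 "statement_")) s),
        ("other", pvIns (l.filter (fun kv =>
          !(PySem.Str.startswith kv.1 "pan_" || PySem.Str.startswith kv.1 "aadhaar_"
            || PySem.Str.startswith kv.1 "statement_"))) PySem.Dict.empty)]⟩ := by
  induction l generalizing p a s with
  | nil => exact absurd rfl h
  | cons kv t ih =>
    by_cases hp : PySem.Str.startswith kv.1 "pan_" = true
    · have ha := pv_excl_pa kv.1 hp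
      have hs := pv_excl_ps kv.1 hp
      simp at hp ha hs
      have hfo : (kv :: t).filter (fun kv =>
          !(PySem.Str.startswith kv.1 "pan_" || PySem.Str.startswith kv.1 "aadhaar_"
            || PySem.Str.startswith kv.1 "statement_")) = t.filter (fun kv =>
          !(PySem.Str.startswith kv.1 "pan_" || PySem.Str.startswith kv.1 "aadhaar_"
            || PySem.Str.startswith kv.1 "statement_")) := by simp [hp]
      rw [hfo] at h
      simp [pvStepA, hp, ha, hs, PySem.Dict.modify, PySem.Dict.insert, PySem.Dict.contains,
        PySem.Dict.getD, PySem.Dict.get?, List.find?, fun p a s => ih p a s h, pvIns];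
          rfl
    · by_cases ha : PySem.Str.startswith kv.1 "aadhaar_" = true
      · have hs := pv_excl_as kv.1 ha
        rw [Bool.not_eq_true] at hp
        simp at hp ha hs
        have hfo : (kv :: t).filter (fun kv =>
            !(PySem.Str.startswith kv.1 "pan_" || PySem.Str.startswith kv.1 "aadhaar_"
              || PySem.Str.startswith kv.1 "statement_")) = t.filter (fun kv =>
            !(PySem.Str.startswith kv.1 "pan_" || PySem.Str.startswith kv.1 "aadhaar_"
              || PySem.Str.startswith kv.1 "statement_")) := by simp [ha]
        rw [hfo] at h
        simp [pvStepA, hp, ha, hs, PySem.Dict.modify, PySem.Dict.insert, PySem.Dict.contains,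
          PySem.Dict.getD, PySem.Dict.get?, List.find?, fun p a s => ih p a s h, pvIns];
          rfl
      · by_cases hs : PySem.Str.startswith kv.1 "statement_" = true
        · rw [Bool.not_eq_true] at hp ha
          simp at hp ha hs
          have hfo : (kv :: t).filter (fun kv =>
              !(PySem.Str.startswith kv.1 "pan_" || PySem.Str.startswith kv.1 "aadhaar_"
                || PySem.Str.startswith kv.1 "statement_")) = t.filter (fun kv =>
              !(PySem.Str.startswith kv.1 "pan_" || PySem.Str.startswith kv.1 "aadhaar_"
                || PySem.Str.startswith kv.1 "statement_")) := by simp [hs]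
          rw [hfo] at h
          simp [pvStepA, hp, ha, hs, PySem.Dict.modify, PySem.Dict.insert, PySem.Dict.contains,
            PySem.Dict.getD, PySem.Dict.get?, List.find?, fun p a s => ih p a s h, pvIns];
          rfl
        · rw [Bool.not_eq_true] at hp ha hs
          simp at hp ha hs
          simp [pvStepA, hp, ha, hs, PySem.Dict.setdefault, PySem.Dict.modify, PySem.Dict.insert,
            PySem.Dict.contains, PySem.Dict.getD, PySem.Dict.get?, List.find?, pv_main4, pvIns];
          rfl

lemma pv_comp_eq_ins (errors : List (String × String)) (pred : String → Bool) :
    pvComp errors pred = pvIns (errors.filter (fun kv => pred kv.1)) PySem.Dict.empty := by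
  simp only [pvComp, pvIns]
  rw [PySem.List.foldl_if_eq_foldl_filter]

-- ===== VERDICT (by name: the statement is the Claim_ definition above) =====
theorem group_field_errors_py_spec : Claim_equal_group_field_errors_py := by
  intro errors _
  simp only [Spec_group_field_errors_py, group_field_errors_py, group_field_errors_py_alt]
  rw [show (PySem.Dict.ofList [("pan", (PySem.Dict.empty : PySem.Dict String String)),
        ("aadhaar", PySem.Dict.empty), ("statement", PySem.Dict.empty)]) =
      (⟨[("pan", PySem.Dict.empty), ("aadhaar", PySem.Dict.empty),
        ("statement", PySem.Dict.empty)]⟩ : PySem.Dict String (PySem.Dict String String)) from rfl]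
  rw [pv_comp_eq_ins, pv_comp_eq_ins, pv_comp_eq_ins, pv_comp_eq_ins]
  by_cases ho : errors.filter (fun kv =>
      !(PySem.Str.startswith kv.1 "pan_" || PySem.Str.startswith kv.1 "aadhaar_"
        || PySem.Str.startswith kv.1 "statement_")) = []
  · rw [pv_main3_none errors _ _ _ ho, ho]
    simp [pvIns, PySem.Dict.empty, List.filter_cons]
  · rw [pv_main3_some errors _ _ _ ho]
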